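-- pv_equiv track=rewrite | github.com/ZERO-A-ONE/FZU-IS-404 | 密码学/MD5/CUI.py | Datafill
-- ===== SOURCE A (Python) =====
-- def Datafill(text):
--     if len(text) == 448:
--         for i in range(512):
--             if i == 0:
--                 text += "1"
--             else:
--                 text += "0"
--     else:
--         tmp = 1
--         while len(text) % 512 != 448:
--             if tmp == 1:
--                 text += "1"
--                 tmp = 0
--             else:
--                 text += "0"
--     return text
-- ===== SOURCE B (Python) =====
-- def Datafill(text):
--     n = len(text)
--     if n == 448:
--         return text + "1" + "0" * 511
--     k = (448 - n) % 512
--     if k == 0: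
--         return text
--     return text + "1" + "0" * (k - 1)
-- ===== Notes on version B (the rewrite author's own statement) =====
-- stated objective: simpler
-- what changed: Replaces the character-by-character while/for appending loops with a closed-form computation of the pad length k = (448 - len) % 512 and a single string-multiplication append.
import Mathlib
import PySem

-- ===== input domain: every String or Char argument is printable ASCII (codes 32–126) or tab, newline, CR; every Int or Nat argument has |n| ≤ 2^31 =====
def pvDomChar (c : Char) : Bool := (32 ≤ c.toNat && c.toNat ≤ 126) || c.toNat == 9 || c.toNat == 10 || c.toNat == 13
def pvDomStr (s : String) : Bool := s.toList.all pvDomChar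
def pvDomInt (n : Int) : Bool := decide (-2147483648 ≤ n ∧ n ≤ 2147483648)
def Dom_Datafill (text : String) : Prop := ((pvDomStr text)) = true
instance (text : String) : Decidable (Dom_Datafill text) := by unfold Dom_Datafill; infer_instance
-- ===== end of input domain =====

-- B computes the MD5 pad length in closed form instead of appending one bit per loop iteration (objective: simpler).

-- ===== PORT A =====
-- the 'while len(text) % 512 != 448' loop, carrying the 'tmp' flag
def DatafillWhile (cs : List Char) (tmp : Bool) : List Char :=
  if cs.length % 512 ≠ 448 then
    DatafillWhile (cs ++ [if tmp then '1' else '0']) false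
  else cs
termination_by (448 + 512 - cs.length % 512) % 512
decreasing_by simp only [List.length_append, List.length_cons, List.length_nil]; omega

def Datafill (text : String) : String :=
  if PySem.Str.len text = 448 then
    String.ofList ((PySem.List.pyRange 0 512 1).foldl
      (fun acc i => if i = 0 then acc ++ ['1'] else acc ++ ['0']) text.toList)
  else
    String.ofList (DatafillWhile text.toList true)

-- ===== PORT B =====
def Datafill_alt (text : String) : String :=
  let n := PySem.Str.len text
  if n = 448 then String.ofList (text.toList ++ '1' :: List.replicate 511 '0')
  else
    let k := PySem.Int.mod (448 - n) 512
    if k = 0 then text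
    else String.ofList (text.toList ++ '1' :: List.replicate (k - 1).toNat '0')

-- ===== PRECONDITION & SPEC =====
def Spec_Datafill (text : String) (out : String) : Prop := out = Datafill_alt text
instance (text : String) (out : String) : Decidable (Spec_Datafill text out) := by unfold Spec_Datafill; infer_instance

-- ===== CLAIM (what is proved, stated in full; the proofs are below) =====
def Claim_equal_Datafill : Prop := ∀ (text : String), Dom_Datafill text → Spec_Datafill text (Datafill text)

-- ===== LEMMAS AND PROOFS =====

theorem padk_eq (L : Nat) :
    ((448 : Int) - (L : Int)) % 512 = (((448 + 512 - L % 512) % 512 : Nat) : Int) := by omega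

-- the while loop appends (if tmp then '1' else '0') then k-1 zeros, where k is the pad count
theorem DatafillWhile_eq (k : Nat) : ∀ (cs : List Char) (tmp : Bool),
    (448 + 512 - cs.length % 512) % 512 = k →
    DatafillWhile cs tmp =
      if k = 0 then cs
      else cs ++ (if tmp then '1' else '0') :: List.replicate (k - 1) '0' := by
  induction k with
  | zero =>
    intro cs tmp h
    have hlen : cs.length % 512 = 448 := by omega
    rw [DatafillWhile]
    simp [hlen]
  | succ k ih =>
    intro cs tmp h
    have hlen : cs.length % 512 ≠ 448 := by omega
    rw [DatafillWhile]
    simp only [hlen, ne_eq, not_false_eq_true, if_pos]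
    rw [ih (cs ++ [if tmp then '1' else '0']) false (by
      simp only [List.length_append, List.length_cons, List.length_nil]; omega)]
    cases k with
    | zero => simp
    | succ j => simp [List.replicate_succ, List.append_assoc]

set_option maxRecDepth 8192 in
theorem Datafill_spec : Claim_equal_Datafill := by
  intro text _
  unfold Spec_Datafill Datafill Datafill_alt
  by_cases h448 : PySem.Str.len text = 448
  · have hmap : (PySem.List.pyRange 0 512 1).map
        (fun i => if i = 0 then '1' else '0') = '1' :: List.replicate 511 '0' := by decide
    rw [show (fun acc (i : Int) => if i = 0 then acc ++ ['1'] else acc ++ ['0']) =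
        (fun acc (i : Int) => acc ++ [if i = 0 then '1' else '0']) from by
      funext acc i; split <;> rfl]
    simp only [h448, if_pos, PySem.List.foldl_append_singleton_eq_map, hmap]
  · simp only [h448, if_false]
    have hlen : PySem.Str.len text = (text.toList.length : Int) := PySem.Str.len_eq text
    set L := text.toList.length with hL
    have hk : PySem.Int.mod (448 - PySem.Str.len text) 512 =
        (((448 + 512 - L % 512) % 512 : Nat) : Int) := by
      rw [PySem.Int.mod_eq_emod_of_pos (by norm_num), hlen]
      exact padk_eq L
    rw [hk]
    rw [DatafillWhile_eq ((448 + 512 - L % 512) % 512) text.toList true rfl]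
    by_cases h0 : (448 + 512 - L % 512) % 512 = 0
    · simp [h0]
    · have h0' : ¬ (((448 + 512 - L % 512) % 512 : Nat) : Int) = 0 := by omega
      simp only [h0, h0', if_false]
      have hnat : ((((448 + 512 - L % 512) % 512 : Nat) : Int) - 1).toNat =
          (448 + 512 - L % 512) % 512 - 1 := by omega
      simp only [if_true, hnat]
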